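-- pv_equiv track=rewrite | github.com/taheniyath/CP-Problems | 04-recursion_powersof3ton-Python/recursion_powersof3ton.py | recurr
-- ===== SOURCE A (Python) =====
-- def recurr(n,count,l):
-- 	if n<=1:
-- 		return l
-- 	else:
-- 		n = n // 3
-- 		count += 1
-- 		num = 3
-- 		return recurr(n,count,l+[num*count])
-- ===== SOURCE B (Python) =====
-- def recurr(n, count, l):
--     # Count the number of division steps first, then build the suffix
--     # with a single list comprehension (no recursion, no repeated list copies).
--     k = 0
--     m = n
--     while m > 1:
--         m //= 3
--         k += 1
--     return l + [3 * (count + i) for i in range(1, k + 1)]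
-- ===== Notes on version B (the rewrite author's own statement) =====
-- stated objective: alternative
-- what changed: Replaces the tail recursion that copies and extends the list at every step with a loop that only counts the division steps, followed by a single list comprehension producing the whole suffix.
import Mathlib
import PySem

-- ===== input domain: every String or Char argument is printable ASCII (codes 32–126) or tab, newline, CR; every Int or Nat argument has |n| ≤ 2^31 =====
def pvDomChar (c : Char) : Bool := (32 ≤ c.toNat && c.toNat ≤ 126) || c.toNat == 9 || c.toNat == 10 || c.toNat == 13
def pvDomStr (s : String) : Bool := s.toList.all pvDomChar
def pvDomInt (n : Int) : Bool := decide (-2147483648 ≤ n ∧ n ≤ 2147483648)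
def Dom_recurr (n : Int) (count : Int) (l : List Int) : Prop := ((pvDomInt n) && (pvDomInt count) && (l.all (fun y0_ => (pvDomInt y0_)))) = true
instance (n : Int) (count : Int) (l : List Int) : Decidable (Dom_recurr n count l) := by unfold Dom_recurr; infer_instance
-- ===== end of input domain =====

-- B replaces A's list-rebuilding tail recursion by counting division steps and emitting the suffix as one comprehension (alternative decomposition).


-- ===== PORT A =====
def recurr (n : Int) (count : Int) (l : List Int) : List Int :=
  if n ≤ 1 then l
  else recurr (PySem.Int.floordiv n 3) (count + 1) (l ++ [3 * (count + 1)])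
termination_by n.toNat
decreasing_by
  rw [PySem.Int.floordiv_eq_ediv_of_pos (by norm_num)]
  omega

-- ===== PORT B =====
-- number of 'm //= 3' steps until m ≤ 1 (the while loop of Source B)
def steps3 (m : Int) : Nat :=
  if m ≤ 1 then 0
  else steps3 (PySem.Int.floordiv m 3) + 1
termination_by m.toNat
decreasing_by
  rw [PySem.Int.floordiv_eq_ediv_of_pos (by norm_num)]
  omega

def recurr_alt (n : Int) (count : Int) (l : List Int) : List Int :=
  l ++ (PySem.List.pyRange 1 ((steps3 n : Int) + 1) 1).map (fun i => 3 * (count + i))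

-- ===== PRECONDITION & SPEC =====
def Spec_recurr (n : Int) (count : Int) (l : List Int) (out : List Int) : Prop := out = recurr_alt n count l
instance (n : Int) (count : Int) (l : List Int) (out : List Int) : Decidable (Spec_recurr n count l out) := by unfold Spec_recurr; infer_instance

-- ===== CLAIM (what is proved, stated in full; the proofs are below) =====
def Claim_equal_recurr : Prop := ∀ (n : Int) (count : Int) (l : List Int), Dom_recurr n count l → Spec_recurr n count l (recurr n count l)

-- ===== LEMMAS AND PROOFS =====
theorem recurr_eq_alt (n : Int) (count : Int) (l : List Int) :
    recurr n count l = recurr_alt n count l := by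
  induction n, count, l using recurr.induct with
  | case1 n count l h =>
      rw [recurr, if_pos h]
      unfold recurr_alt
      rw [steps3, if_pos h]
      simp
  | case2 n count l h ih =>
      rw [recurr, if_neg h, ih]
      unfold recurr_alt
      conv_rhs => rw [steps3, if_neg h]
      rw [List.append_assoc]
      congr 1
      push_cast
      set k : Int := (steps3 (PySem.Int.floordiv n 3) : Int) with hk
      have h0 : (0:Int) ≤ k := hk ▸ Int.natCast_nonneg _
      rw [PySem.List.pyRange_one_cons (by omega : (1:Int) < k + 1 + 1)]
      simp only [List.map_cons, List.singleton_append]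
      congr 1
      rw [PySem.List.pyRange_one, PySem.List.pyRange_one]
      simp only [List.map_map]
      congr 1
      · funext j
        simp
        ring
      · congr 1
        omega

-- ===== VERDICT (by name: the statement is the Claim_ definition above) =====
theorem recurr_spec : Claim_equal_recurr := by
  intro n count l _
  unfold Spec_recurr
  exact recurr_eq_alt n count l
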